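-- pv_equiv track=rewrite | github.com/michalsr/cs498_finalproject | datasets/make_datasets.py | convert_labels
-- ===== SOURCE A (Python) =====
-- def convert_labels(labels):
--     label_dict = {}
--     num = 0
--     final_labels = []
--     for i in labels:
--         if i not in label_dict:
--            label_dict[i] = num
--            final_labels.append(num)
--            num += 1
--         else:
--           final_labels.append(label_dict[i])
--     return final_labels
-- ===== SOURCE B (Python) =====
-- def convert_labels(labels):
--     # first occurrence position of each label: a backward pass overwrites later positions
--     first = {}
--     for i, l in reversed(list(enumerate(labels))):
--         first[l] = i
--     # id of a label = rank of its first-occurrence position among all first-occurrence positions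
--     rank = {p: r for r, p in enumerate(sorted(first.values()))}
--     return [rank[first[l]] for l in labels]
-- ===== Notes on version B (the rewrite author's own statement) =====
-- stated objective: alternative
-- what changed: A assigns ids with a label-to-id dict and a running counter in one forward loop; B never counts: a backward pass records each label's first-occurrence position, sorts those positions, and maps each label through the rank of its first position.
import Mathlib
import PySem

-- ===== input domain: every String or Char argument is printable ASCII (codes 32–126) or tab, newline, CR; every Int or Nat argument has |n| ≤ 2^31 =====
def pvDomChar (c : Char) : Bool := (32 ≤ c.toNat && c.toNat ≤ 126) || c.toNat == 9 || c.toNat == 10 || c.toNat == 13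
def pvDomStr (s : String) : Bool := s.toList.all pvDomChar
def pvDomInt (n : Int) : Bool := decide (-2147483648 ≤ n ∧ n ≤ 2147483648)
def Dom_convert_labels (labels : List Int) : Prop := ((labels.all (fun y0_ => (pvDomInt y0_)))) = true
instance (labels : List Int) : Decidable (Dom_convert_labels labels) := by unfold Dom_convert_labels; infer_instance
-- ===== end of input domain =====

-- B replaces A's label-to-id dict with a running counter by a counter-free algorithm:
-- a backward pass records first-occurrence positions, which are sorted and ranked.


-- ===== PORT A =====
-- one loop: dict lookup/insert, running counter 'num', output appended as we go
def convert_labels (labels : List Int) : List Int :=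
  (labels.foldl
    (fun (st : PySem.Dict Int Int × Int × List Int) i =>
      let d := st.1; let num := st.2.1; let fl := st.2.2
      if d.contains i = false then
        (d.insert i num, num + 1, fl ++ [num])
      else
        (d, num, fl ++ [(d.get? i).getD 0]))   -- label_dict[i]: key always present on this branch
    (PySem.Dict.empty, 0, [])).2.2

-- ===== PORT B =====
def convert_labels_alt (labels : List Int) : List Int :=
  -- for i, l in reversed(list(enumerate(labels))): first[l] = i
  let first := ((PySem.List.enumerate labels).reverse).foldl
      (fun (d : PySem.Dict Int Int) p => d.insert p.2 p.1) PySem.Dict.empty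
  -- rank = {p: r for r, p in enumerate(sorted(first.values()))}
  let rank := (PySem.List.enumerate (PySem.List.sorted first.values (fun x => x))).foldl
      (fun (d : PySem.Dict Int Int) p => d.insert p.2 p.1) PySem.Dict.empty
  -- [rank[first[l]] for l in labels]: both keys always present
  labels.map (fun l => (rank.get? ((first.get? l).getD 0)).getD 0)

-- ===== PRECONDITION & SPEC =====
def Spec_convert_labels (labels : List Int) (out : List Int) : Prop := out = convert_labels_alt labels
instance (labels : List Int) (out : List Int) : Decidable (Spec_convert_labels labels out) := by unfold Spec_convert_labels; infer_instance

-- ===== CLAIM (what is proved, stated in full; the proofs are below) =====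
def Claim_equal_convert_labels : Prop := ∀ (labels : List Int), Dom_convert_labels labels → Spec_convert_labels labels (convert_labels labels)

-- ===== LEMMAS AND PROOFS =====

-- the growing 'seen' list is only ever extended on the right
theorem foldl_add_prefix (rest seen : List Int) :
    ∃ t, rest.foldl PySem.Set.add seen = seen ++ t := by
  induction rest generalizing seen with
  | nil => exact ⟨[], by simp⟩
  | cons x xs ih =>
    simp only [List.foldl_cons]
    by_cases hx : x ∈ seen
    · rw [PySem.Set.add_of_mem hx]; exact ih seen
    · rw [PySem.Set.add_of_not_mem hx]
      rcases ih (seen ++ [x]) with ⟨t, ht⟩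
      exact ⟨[x] ++ t, by simpa [List.append_assoc] using ht⟩

-- invariant of A's loop: dict = rank-in-seen, num = |seen|, output so far = acc
theorem loopA_eq (rest : List Int) (seen : List Int) (d : PySem.Dict Int Int) (acc : List Int)
    (hnd : seen.Nodup)
    (hd : ∀ l, d.get? l = if l ∈ seen then some ((seen.idxOf l : Nat) : Int) else none) :
    (rest.foldl
      (fun (st : PySem.Dict Int Int × Int × List Int) i =>
        let d := st.1; let num := st.2.1; let fl := st.2.2
        if d.contains i = false then
          (d.insert i num, num + 1, fl ++ [num])
        else
          (d, num, fl ++ [(d.get? i).getD 0]))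
      (d, (seen.length : Int), acc)).2.2
    = acc ++ rest.map (fun l => ((rest.foldl PySem.Set.add seen).idxOf l : Int)) := by
  induction rest generalizing seen d acc with
  | nil => simp
  | cons x xs ih =>
    simp only [List.foldl_cons, List.map_cons]
    have hcontains : d.contains x = (x ∈ seen : Bool) := by
      rw [PySem.Dict.contains_eq_isSome_get?, hd x]
      by_cases hx : x ∈ seen <;> simp [hx]
    by_cases hx : x ∈ seen
    · -- seen branch: dict unchanged, rank appended
      rw [show (if d.contains x = false then
            (d.insert x (seen.length : Int), (seen.length : Int) + 1, acc ++ [(seen.length : Int)])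
          else (d, (seen.length : Int), acc ++ [(d.get? x).getD 0]))
          = (d, (seen.length : Int), acc ++ [(d.get? x).getD 0]) by
        simp [hcontains, hx]]
      rw [PySem.Set.add_of_mem hx, ih seen d _ hnd hd]
      rcases foldl_add_prefix xs seen with ⟨t, ht⟩
      rw [hd x]
      simp only [hx, if_pos, Option.getD_some, List.append_assoc, List.singleton_append]
      rw [ht, List.idxOf_append_of_mem hx]
    · -- new label: insert with rank |seen|, extend seen
      rw [show (if d.contains x = false then
            (d.insert x (seen.length : Int), (seen.length : Int) + 1, acc ++ [(seen.length : Int)])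
          else (d, (seen.length : Int), acc ++ [(d.get? x).getD 0]))
          = (d.insert x (seen.length : Int), (seen.length : Int) + 1, acc ++ [(seen.length : Int)]) by
        simp [hcontains, hx]]
      rw [PySem.Set.add_of_not_mem hx]
      have hnd' : (seen ++ [x]).Nodup :=
        hnd.append (List.nodup_singleton x) (by simpa [List.disjoint_singleton] using hx)
      have hd' : ∀ l, (d.insert x (seen.length : Int)).get? l
          = if l ∈ seen ++ [x] then some (((seen ++ [x]).idxOf l : Nat) : Int) else none := by
        intro l
        by_cases hlx : l = x
        · subst hlx
          rw [PySem.Dict.get?_insert_self]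
          simp [List.idxOf_append_of_notMem hx, List.idxOf_cons_self]
        · rw [PySem.Dict.get?_insert_of_ne _ _ hlx, hd l]
          by_cases hls : l ∈ seen
          · simp [hls, List.idxOf_append_of_mem hls]
          · simp [hls, hlx]
      have hlen : ((seen ++ [x]).length : Int) = (seen.length : Int) + 1 := by
        simp
      rw [← hlen, ih (seen ++ [x]) _ _ hnd' hd']
      rcases foldl_add_prefix xs (seen ++ [x]) with ⟨t, ht⟩
      have hxidx : List.idxOf x (seen ++ [x] ++ t) = seen.length := by
        rw [List.append_assoc, List.idxOf_append_of_notMem hx]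
        simp
      rw [ht, hxidx]
      simp

-- B's backward pass: the surviving binding of a key is its FIRST (index, value) pair
theorem first_get? (labels : List Int) (s : Int) (d : PySem.Dict Int Int) (k : Int) :
    (((PySem.List.enumerate labels s).reverse).foldl
        (fun (d : PySem.Dict Int Int) p => d.insert p.2 p.1) d).get? k
      = if k ∈ labels then some (s + (labels.idxOf k : Nat)) else d.get? k := by
  induction labels generalizing s d with
  | nil => simp [PySem.List.enumerate]
  | cons x xs ih =>
    rw [PySem.List.enumerate_cons]
    simp only [List.reverse_cons, List.foldl_append, List.foldl_cons, List.foldl_nil]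
    by_cases hkx : k = x
    · subst hkx
      rw [PySem.Dict.get?_insert_self]
      simp [List.idxOf_cons_self]
    · rw [PySem.Dict.get?_insert_of_ne _ _ hkx, ih (s + 1) d]
      by_cases hmem : k ∈ xs
      · simp only [hmem, List.mem_cons, hkx, false_or, if_pos]
        rw [List.idxOf_cons_ne xs (fun h => hkx h.symm)]
        congr 1
        push_cast
        ring
      · simp [hmem, hkx]

-- lookup in the dict built by B's enumerate fold: rank of l in a Nodup list
theorem get?_enumFold (order : List Int) (s : Int) (d : PySem.Dict Int Int)
    (hnd : order.Nodup) (l : Int) :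
    ((PySem.List.enumerate order s).foldl
        (fun (d : PySem.Dict Int Int) p => d.insert p.2 p.1) d).get? l
      = if l ∈ order then some (s + (order.idxOf l : Nat)) else d.get? l := by
  induction order generalizing s d with
  | nil => simp [PySem.List.enumerate]
  | cons x xs ih =>
    rw [PySem.List.enumerate_cons]
    simp only [List.foldl_cons]
    rcases List.nodup_cons.mp hnd with ⟨hx, hxs⟩
    rw [ih (s + 1) _ hxs]
    by_cases hlx : l = x
    · subst hlx
      simp [hx, PySem.Dict.get?_insert_self, List.idxOf_cons_self]
    · rw [PySem.Dict.get?_insert_of_ne _ _ hlx]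
      by_cases hmem : l ∈ xs
      · simp [hmem, hlx, List.idxOf_cons_ne xs (Ne.symm hlx)]
        ring
      · simp [hmem, hlx]

-- first-occurrence positions are strictly increasing along the running dedup
theorem pairwise_idx (labels : List Int) : ∀ (rest pre seen : List Int),
    labels = pre ++ rest →
    (∀ y, y ∈ seen ↔ y ∈ pre) →
    ((seen.map (fun k => (labels.idxOf k : Int))).Pairwise (· < ·)) →
    (((rest.foldl PySem.Set.add seen).map (fun k => (labels.idxOf k : Int))).Pairwise (· < ·)) := by
  intro rest
  induction rest with
  | nil => intro pre seen _ _ hpw; simpa using hpw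
  | cons x xs ih =>
    intro pre seen heq hmem hpw
    simp only [List.foldl_cons]
    by_cases hx : x ∈ seen
    · rw [PySem.Set.add_of_mem hx]
      refine ih (pre ++ [x]) seen (by simp [heq]) ?_ hpw
      intro y
      rw [hmem y]
      constructor
      · intro h; exact List.mem_append_left _ h
      · intro h
        rcases List.mem_append.mp h with h | h
        · exact h
        · simp only [List.mem_singleton] at h
          subst h; exact (hmem y).mp hx
    · rw [PySem.Set.add_of_not_mem hx]
      refine ih (pre ++ [x]) (seen ++ [x]) (by simp [heq]) ?_ ?_
      · intro y; simp [hmem y]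
      · rw [List.map_append, List.pairwise_append]
        refine ⟨hpw, by simp, ?_⟩
        intro a ha b hb
        simp only [List.map_cons, List.map_nil, List.mem_singleton] at hb
        subst hb
        rcases List.mem_map.mp ha with ⟨y, hy, rfl⟩
        have hypre : y ∈ pre := (hmem y).mp hy
        have hxpre : x ∉ pre := fun h => hx ((hmem x).mpr h)
        have h1 : labels.idxOf y = pre.idxOf y := by
          rw [heq, List.idxOf_append_of_mem hypre]
        have h2 : labels.idxOf x = pre.length := by
          rw [heq, List.idxOf_append_of_notMem hxpre]
          simp [List.idxOf_cons_self]
        rw [h1, h2]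
        exact_mod_cast List.idxOf_lt_length_of_mem hypre

-- ===== VERDICT (by name: the statement is the Claim_ definition above) =====
theorem convert_labels_spec : Claim_equal_convert_labels := by
  intro labels _
  unfold Spec_convert_labels convert_labels convert_labels_alt
  -- A's result
  have hA := loopA_eq labels [] PySem.Dict.empty [] List.nodup_nil
    (fun l => by simp [PySem.Dict.get?_empty])
  simp only [List.length_nil, Nat.cast_zero, List.nil_append] at hA
  rw [hA]
  -- abbreviations
  set f : Int → Int := fun k => (labels.idxOf k : Int) with hf
  have hofl : ∀ xs : List Int, PySem.Set.ofList xs = xs.foldl PySem.Set.add [] :=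
    PySem.Set.ofList_eq_foldl
  -- B's first dict
  set first := ((PySem.List.enumerate labels).reverse).foldl
      (fun (d : PySem.Dict Int Int) p => d.insert p.2 p.1) PySem.Dict.empty with hfirst
  have hfg : ∀ k, k ∈ labels → first.get? k = some (f k) := by
    intro k hk
    rw [hfirst, first_get? labels 0 PySem.Dict.empty k]
    simp [hk, hf]
  -- keys of first = dedup of reversed labels
  have hkeys : first.keys = PySem.List.dedup labels.reverse := by
    rw [hfirst, PySem.Dict.keys_foldl_insert_key _ (fun p : Int × Int => p.2) (fun _ p => p.1)]
    rw [show ((PySem.List.enumerate labels).reverse).map (fun p : Int × Int => p.2)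
        = labels.reverse by
      rw [List.map_reverse, PySem.List.map_snd_enumerate]]
    simp [PySem.Set.update, PySem.Set.ofList, PySem.Dict.keys_empty, PySem.List.dedup]
  have hkeysnd : first.keys.Nodup := by
    rw [hkeys]; exact PySem.List.nodup_dedup _
  -- values of first
  have hvals : first.values = (PySem.List.dedup labels.reverse).map f := by
    rw [PySem.Dict.values_eq_map_keys first hkeysnd 0, hkeys]
    apply List.map_congr_left
    intro k hk
    have hkl : k ∈ labels := by
      have := (PySem.List.mem_dedup _ k).mp hk
      exact List.mem_reverse.mp this
    rw [PySem.Dict.getD_eq_get?_getD, hfg k hkl]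
    rfl
  -- the sorted first positions are exactly the dedup-order positions
  set T : List Int := (labels.foldl PySem.Set.add []).map f with hT
  have hTpw : T.Pairwise (· < ·) := by
    rw [hT]
    exact pairwise_idx labels labels [] [] rfl (by simp) (by simp)
  have hTnd : T.Nodup := hTpw.nodup
  have hperm : T.Perm first.values := by
    rw [hvals, hT]
    apply List.Perm.map
    rw [show labels.foldl PySem.Set.add [] = PySem.List.dedup labels by
      rw [PySem.List.dedup_eq_ofList, hofl]]
    rw [List.perm_ext_iff_of_nodup (PySem.List.nodup_dedup _) (PySem.List.nodup_dedup _)]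
    intro a
    rw [PySem.List.mem_dedup, PySem.List.mem_dedup, List.mem_reverse]
  have hsorted : PySem.List.sorted first.values (fun x => x) = T :=
    PySem.List.sorted_eq_of_perm_of_pairwise_lt first.values T (fun x => x) hperm hTpw
  -- elementwise equality
  apply List.map_congr_left
  intro l hl
  rw [hfg l hl]
  simp only [Option.getD_some, hsorted]
  rw [get?_enumFold T 0 PySem.Dict.empty hTnd (f l)]
  have hdl : l ∈ labels.foldl PySem.Set.add [] := by
    rw [show labels.foldl PySem.Set.add [] = PySem.List.dedup labels by
      rw [PySem.List.dedup_eq_ofList, hofl]]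
    exact (PySem.List.mem_dedup _ l).mpr hl
  have hfT : f l ∈ T := by rw [hT]; exact List.mem_map_of_mem hdl
  have hidxT : T.idxOf (f l) = (labels.foldl PySem.Set.add []).idxOf l := by
    set D := labels.foldl PySem.Set.add [] with hD
    have hDnd : D.Nodup := by
      rw [hD, show labels.foldl PySem.Set.add [] = PySem.List.dedup labels by
        rw [PySem.List.dedup_eq_ofList, hofl]]
      exact PySem.List.nodup_dedup _
    have hj : D.idxOf l < D.length := List.idxOf_lt_length_of_mem hdl
    have hjT : D.idxOf l < T.length := by rw [hT]; simpa using hj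
    have hgetT : T[D.idxOf l]'hjT = f l := by
      have hmap := List.getElem_map (f := f) (l := D) (i := D.idxOf l) (h := by simpa using hj)
      exact hmap.trans (by rw [List.getElem_idxOf hj])
    calc T.idxOf (f l) = T.idxOf (T[D.idxOf l]'hjT) := by rw [hgetT]
      _ = D.idxOf l := List.Nodup.idxOf_getElem hTnd _ hjT
  rw [if_pos hfT, hidxT]
  simp
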